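-- pv_equiv track=rewrite | github.com/dbswl4951/baekjoon_algorithm | backjoon_algorithm/implementation/ex8972.py | getDir
-- ===== SOURCE A (Python) =====
-- dx=[1,1,1,0,0,0,-1,-1,-1]
--
-- dy=[-1,0,1,-1,0,1,-1,0,1]
--
-- def getDir(mx,my,ax,ay):
--     dist=int(1e9)
--     dir=10
--     for i in range(9):
--         temp=abs(mx - (ax+dx[i])) + abs(my - (ay+dy[i]))
--         if temp<dist:
--             dist=temp
--             dir=i
--     return dir
-- ===== SOURCE B (Python) =====
-- def getDir(mx, my, ax, ay):
--     # per-axis decomposition: Manhattan distance splits into an x-part and a y-part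
--     X = mx - ax
--     Y = my - ay
--     ai = 0
--     bestx = abs(X - 1)
--     for i, d in ((1, 0), (2, -1)):
--         v = abs(X - d)
--         if v < bestx:
--             bestx = v
--             ai = i
--     bi = 0
--     besty = abs(Y + 1)
--     for i, d in ((1, 0), (2, 1)):
--         v = abs(Y - d)
--         if v < besty:
--             besty = v
--             bi = i
--     return 3 * ai + bi
-- ===== Notes on version B (the rewrite author's own statement) =====
-- stated objective: alternative
-- what changed: Replaces the single scan over all 9 neighbours keeping a running (dist,dir) minimum by a per-axis decomposition: the Manhattan distance splits into an x-part and a y-part, so B finds the nearest x-offset index ai and y-offset index bi in two tiny independent loops and returns 3*ai+bi.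
-- intended difference: When the two points are so far apart that all 9 candidate Manhattan distances are >= 1e9 (max(|mx-ax|-1,0)+max(|my-ay|-1,0) >= 1e9), A's initial dist=1e9 is never beaten and A returns its leftover sentinel dir=10, which is not a direction index; B returns the index of the actually nearest neighbour, the intended value. — e.g. on getDir(1000000001, 0, 0, 0): A returns 10, B returns 1
import Mathlib
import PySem

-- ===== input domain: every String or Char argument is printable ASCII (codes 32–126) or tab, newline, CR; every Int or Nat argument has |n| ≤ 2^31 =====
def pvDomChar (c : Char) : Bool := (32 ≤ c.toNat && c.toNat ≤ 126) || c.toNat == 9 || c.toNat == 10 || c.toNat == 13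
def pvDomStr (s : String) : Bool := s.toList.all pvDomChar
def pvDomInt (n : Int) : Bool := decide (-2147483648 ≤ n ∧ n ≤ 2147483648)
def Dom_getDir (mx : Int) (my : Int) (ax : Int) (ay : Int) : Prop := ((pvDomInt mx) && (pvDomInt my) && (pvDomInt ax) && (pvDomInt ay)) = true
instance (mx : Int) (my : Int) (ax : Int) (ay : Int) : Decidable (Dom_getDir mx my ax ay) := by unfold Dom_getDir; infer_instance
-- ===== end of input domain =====

-- B finds the nearest of the 9 neighbours per axis (x-loop and y-loop, combined as 3*ai+bi)
-- instead of scanning all 9; where every candidate distance reaches A's 1e9 initial dist,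
-- A returns its leftover sentinel dir=10 while B returns the nearest direction (see D_ below).

-- ===== PORT A =====
def dxA : List Int := [1, 1, 1, 0, 0, 0, -1, -1, -1]
def dyA : List Int := [-1, 0, 1, -1, 0, 1, -1, 0, 1]
-- dx[i]/dy[i]: i is always 0..8 here, so plain getD is an exact port of the list indexing
def getDir (mx : Int) (my : Int) (ax : Int) (ay : Int) : Int :=
  ((List.range 9).foldl
    (fun (s : Int × Int) i =>
      let temp := |mx - (ax + dxA.getD i 0)| + |my - (ay + dyA.getD i 0)|
      if temp < s.1 then (temp, (i : Int)) else s)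
    (1000000000, 10)).2

-- ===== PORT B =====
def getDir_alt (mx : Int) (my : Int) (ax : Int) (ay : Int) : Int :=
  let X := mx - ax
  let Y := my - ay
  let px := [((1 : Int), (0 : Int)), (2, -1)].foldl
    (fun (s : Int × Int) p => let v := |X - p.2|; if v < s.1 then (v, p.1) else s)
    (|X - 1|, 0)
  let py := [((1 : Int), (0 : Int)), (2, 1)].foldl
    (fun (s : Int × Int) p => let v := |Y - p.2|; if v < s.1 then (v, p.1) else s)
    (|Y + 1|, 0)
  3 * px.2 + py.2

-- ===== PRECONDITION & SPEC =====
-- When the two points are so far apart that all 9 candidate Manhattan distances are ≥ 10^9,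
-- A's initial dist=1e9 is never beaten and A returns its leftover sentinel dir=10 (not a
-- direction index); B returns the index of the actually nearest neighbour, the intended value.
def D_getDir (mx : Int) (my : Int) (ax : Int) (ay : Int) : Prop :=
  max (|mx - ax| - 1) 0 + max (|my - ay| - 1) 0 ≥ 1000000000
instance (mx : Int) (my : Int) (ax : Int) (ay : Int) : Decidable (D_getDir mx my ax ay) := by
  unfold D_getDir; infer_instance
def Spec_getDir (mx : Int) (my : Int) (ax : Int) (ay : Int) (out : Int) : Prop :=
  ¬ D_getDir mx my ax ay → out = getDir_alt mx my ax ay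
instance (mx : Int) (my : Int) (ax : Int) (ay : Int) (out : Int) : Decidable (Spec_getDir mx my ax ay out) := by unfold Spec_getDir; infer_instance
def pvDiffWitness_getDir : Int × Int × Int × Int := (1000000001, 0, 0, 0)
def pvDiffWitnessOut_getDir : Int × Int := (10, 1)

-- ===== CLAIM (what is proved, stated in full; the proofs are below) =====
def Claim_unchanged_getDir : Prop := ∀ (mx : Int) (my : Int) (ax : Int) (ay : Int), Dom_getDir mx my ax ay → Spec_getDir mx my ax ay (getDir mx my ax ay)
def Claim_changed_getDir : Prop := Dom_getDir (pvDiffWitness_getDir.1) (pvDiffWitness_getDir.2.1) (pvDiffWitness_getDir.2.2.1) (pvDiffWitness_getDir.2.2.2) ∧ D_getDir (pvDiffWitness_getDir.1) (pvDiffWitness_getDir.2.1) (pvDiffWitness_getDir.2.2.1) (pvDiffWitness_getDir.2.2.2) ∧ getDir (pvDiffWitness_getDir.1) (pvDiffWitness_getDir.2.1) (pvDiffWitness_getDir.2.2.1) (pvDiffWitness_getDir.2.2.2) = pvDiffWitnessOut_getDir.1 ∧ getDir_alt (pvDiffWitness_getDir.1) (pvDiffWitness_getDir.2.1) (pvDiffWitness_getDir.2.2.1)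 (pvDiffWitness_getDir.2.2.2) = pvDiffWitnessOut_getDir.2 ∧ pvDiffWitnessOut_getDir.1 ≠ pvDiffWitnessOut_getDir.2
def Claim_exact_getDir : Prop := ∀ (mx : Int) (my : Int) (ax : Int) (ay : Int), Dom_getDir mx my ax ay → D_getDir mx my ax ay → getDir mx my ax ay ≠ getDir_alt mx my ax ay

-- ===== LEMMAS AND PROOFS =====

-- A's candidate cost at index i
def fA (mx my ax ay : Int) (i : Nat) : Int :=
  |mx - (ax + dxA.getD i 0)| + |my - (ay + dyA.getD i 0)|

-- once the running minimum is below every remaining candidate, the fold keeps its state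
theorem fold_keep (f : Nat → Int) (l : List Nat) (m : Int) (j : Int)
    (h : ∀ i ∈ l, ¬ f i < m) :
    l.foldl (fun (s : Int × Int) i => if f i < s.1 then (f i, (i : Int)) else s) (m, j) = (m, j) := by
  induction l with
  | nil => rfl
  | cons a t ih =>
    simp only [List.foldl_cons, if_neg (h a (by simp))]
    exact ih (fun i hi => h i (by simp [hi]))

-- a strictly unique minimum below the initial dist is what the strict-< fold returns
theorem fold_min (f : Nat → Int) (l : List Nat) (i0 : Nat)
    (hu : ∀ j' ∈ l, j' ≠ i0 → f i0 < f j') :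
    ∀ (d : Int) (j : Int), i0 ∈ l → f i0 < d →
    l.foldl (fun (s : Int × Int) i => if f i < s.1 then (f i, (i : Int)) else s) (d, j)
      = (f i0, (i0 : Int)) := by
  induction l with
  | nil => intro d j h0; exact absurd h0 (by simp)
  | cons a t ih =>
    intro d j h0 hd
    by_cases ha : a = i0
    · subst ha
      simp only [List.foldl_cons, if_pos hd]
      refine fold_keep f t (f a) (a : Int) ?_
      intro i hi
      by_cases hia : i = a
      · subst hia; omega
      · have := hu i (by simp [hi]) hia; omega
    · have h0t : i0 ∈ t := by
        cases List.mem_cons.mp h0 with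
        | inl h => exact absurd h.symm ha
        | inr h => exact h
      have hut : ∀ j' ∈ t, j' ≠ i0 → f i0 < f j' := fun j' hj' => hu j' (by simp [hj'])
      have hfa : f i0 < f a := hu a (by simp) ha
      simp only [List.foldl_cons]
      by_cases hc : f a < d
      · simp only [if_pos hc]
        exact ih hut (f a) (a : Int) h0t hfa
      · simp only [if_neg hc]
        exact ih hut d j h0t hd

theorem getDir_eq_i0 (mx my ax ay : Int) (i0 : Nat) (h9 : i0 ∈ List.range 9)
    (hd : fA mx my ax ay i0 < 1000000000)
    (hu : ∀ j' ∈ List.range 9, j' ≠ i0 → fA mx my ax ay i0 < fA mx my ax ay j') :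
    getDir mx my ax ay = (i0 : Int) := by
  show ((List.range 9).foldl
    (fun (s : Int × Int) i => if fA mx my ax ay i < s.1 then (fA mx my ax ay i, (i : Int)) else s)
    (1000000000, 10)).2 = (i0 : Int)
  rw [fold_min (fA mx my ax ay) (List.range 9) i0 hu 1000000000 10 h9 hd]

theorem getDir_spec : Claim_unchanged_getDir := by
  intro mx my ax ay _ hD
  unfold D_getDir at hD
  have hx : (1 ≤ mx - ax) ∨ (mx - ax = 0) ∨ (mx - ax ≤ -1) := by omega
  have hy : (my - ay ≤ -1) ∨ (my - ay = 0) ∨ (1 ≤ my - ay) := by omega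
  have habs : ∀ z : Int, |z| = (z.natAbs : Int) := fun z => Int.abs_eq_natAbs z
  rcases hx with hx | hx | hx <;> rcases hy with hy | hy | hy
  case _ => -- i0 = 0
    rw [getDir_eq_i0 mx my ax ay 0 (by decide)
      (by simp only [fA, dxA, dyA, List.getD, List.getElem?_cons_zero, Option.getD_some, habs] at *; omega)
      (by intro j hj hne; simp only [List.mem_range] at hj; interval_cases j <;> simp only [fA, dxA, dyA, List.getD, List.getElem?_cons_zero, List.getElem?_cons_succ, Option.getD_some, habs] at * <;> omega)]
    simp only [getDir_alt, List.foldl_cons, List.foldl_nil]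
    split_ifs <;> simp only [habs] at * <;> omega
  case _ => -- i0 = 1
    rw [getDir_eq_i0 mx my ax ay 1 (by decide)
      (by simp only [fA, dxA, dyA, List.getD, List.getElem?_cons_zero, List.getElem?_cons_succ, Option.getD_some, habs] at *; omega)
      (by intro j hj hne; simp only [List.mem_range] at hj; interval_cases j <;> simp only [fA, dxA, dyA, List.getD, List.getElem?_cons_zero, List.getElem?_cons_succ, Option.getD_some, habs] at * <;> omega)]
    simp only [getDir_alt, List.foldl_cons, List.foldl_nil]
    split_ifs <;> simp only [habs] at * <;> omega
  case _ => -- i0 = 2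
    rw [getDir_eq_i0 mx my ax ay 2 (by decide)
      (by simp only [fA, dxA, dyA, List.getD, List.getElem?_cons_zero, List.getElem?_cons_succ, Option.getD_some, habs] at *; omega)
      (by intro j hj hne; simp only [List.mem_range] at hj; interval_cases j <;> simp only [fA, dxA, dyA, List.getD, List.getElem?_cons_zero, List.getElem?_cons_succ, Option.getD_some, habs] at * <;> omega)]
    simp only [getDir_alt, List.foldl_cons, List.foldl_nil]
    split_ifs <;> simp only [habs] at * <;> omega
  case _ => -- i0 = 3
    rw [getDir_eq_i0 mx my ax ay 3 (by decide)
      (by simp only [fA, dxA, dyA, List.getD, List.getElem?_cons_zero, List.getElem?_cons_succ, Option.getD_some, habs] at *; omega)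
      (by intro j hj hne; simp only [List.mem_range] at hj; interval_cases j <;> simp only [fA, dxA, dyA, List.getD, List.getElem?_cons_zero, List.getElem?_cons_succ, Option.getD_some, habs] at * <;> omega)]
    simp only [getDir_alt, List.foldl_cons, List.foldl_nil]
    split_ifs <;> simp only [habs] at * <;> omega
  case _ => -- i0 = 4
    rw [getDir_eq_i0 mx my ax ay 4 (by decide)
      (by simp only [fA, dxA, dyA, List.getD, List.getElem?_cons_zero, List.getElem?_cons_succ, Option.getD_some, habs] at *; omega)
      (by intro j hj hne; simp only [List.mem_range] at hj; interval_cases j <;> simp only [fA, dxA, dyA, List.getD, List.getElem?_cons_zero, List.getElem?_cons_succ, Option.getD_some, habs] at * <;> omega)]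
    simp only [getDir_alt, List.foldl_cons, List.foldl_nil]
    split_ifs <;> simp only [habs] at * <;> omega
  case _ => -- i0 = 5
    rw [getDir_eq_i0 mx my ax ay 5 (by decide)
      (by simp only [fA, dxA, dyA, List.getD, List.getElem?_cons_zero, List.getElem?_cons_succ, Option.getD_some, habs] at *; omega)
      (by intro j hj hne; simp only [List.mem_range] at hj; interval_cases j <;> simp only [fA, dxA, dyA, List.getD, List.getElem?_cons_zero, List.getElem?_cons_succ, Option.getD_some, habs] at * <;> omega)]
    simp only [getDir_alt, List.foldl_cons, List.foldl_nil]
    split_ifs <;> simp only [habs] at * <;> omega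
  case _ => -- i0 = 6
    rw [getDir_eq_i0 mx my ax ay 6 (by decide)
      (by simp only [fA, dxA, dyA, List.getD, List.getElem?_cons_zero, List.getElem?_cons_succ, Option.getD_some, habs] at *; omega)
      (by intro j hj hne; simp only [List.mem_range] at hj; interval_cases j <;> simp only [fA, dxA, dyA, List.getD, List.getElem?_cons_zero, List.getElem?_cons_succ, Option.getD_some, habs] at * <;> omega)]
    simp only [getDir_alt, List.foldl_cons, List.foldl_nil]
    split_ifs <;> simp only [habs] at * <;> omega
  case _ => -- i0 = 7
    rw [getDir_eq_i0 mx my ax ay 7 (by decide)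
      (by simp only [fA, dxA, dyA, List.getD, List.getElem?_cons_zero, List.getElem?_cons_succ, Option.getD_some, habs] at *; omega)
      (by intro j hj hne; simp only [List.mem_range] at hj; interval_cases j <;> simp only [fA, dxA, dyA, List.getD, List.getElem?_cons_zero, List.getElem?_cons_succ, Option.getD_some, habs] at * <;> omega)]
    simp only [getDir_alt, List.foldl_cons, List.foldl_nil]
    split_ifs <;> simp only [habs] at * <;> omega
  case _ => -- i0 = 8
    rw [getDir_eq_i0 mx my ax ay 8 (by decide)
      (by simp only [fA, dxA, dyA, List.getD, List.getElem?_cons_zero, List.getElem?_cons_succ, Option.getD_some, habs] at *; omega)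
      (by intro j hj hne; simp only [List.mem_range] at hj; interval_cases j <;> simp only [fA, dxA, dyA, List.getD, List.getElem?_cons_zero, List.getElem?_cons_succ, Option.getD_some, habs] at * <;> omega)]
    simp only [getDir_alt, List.foldl_cons, List.foldl_nil]
    split_ifs <;> simp only [habs] at * <;> omega

theorem getDir_changed : Claim_changed_getDir := by unfold Claim_changed_getDir; decide

theorem getDir_tight : Claim_exact_getDir := by
  intro mx my ax ay _ hD
  unfold D_getDir at hD
  have habs : ∀ z : Int, |z| = (z.natAbs : Int) := fun z => Int.abs_eq_natAbs z
  have hA : getDir mx my ax ay = 10 := by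
    show ((List.range 9).foldl
      (fun (s : Int × Int) i => if fA mx my ax ay i < s.1 then (fA mx my ax ay i, (i : Int)) else s)
      (1000000000, 10)).2 = 10
    rw [fold_keep (fA mx my ax ay) (List.range 9) 1000000000 10 ?_]
    intro i hi
    simp only [List.mem_range] at hi
    interval_cases i <;> simp only [fA, dxA, dyA, List.getD, List.getElem?_cons_zero, List.getElem?_cons_succ, Option.getD_some, habs] at * <;> omega
  have hB : getDir_alt mx my ax ay ≤ 8 := by
    simp only [getDir_alt, List.foldl_cons, List.foldl_nil]
    split_ifs <;> omega
  omega
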